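-- pv_equiv track=rewrite | github.com/ariuk44/retake_exam_prep | day_24.py | isZeroPlentiful
-- ===== SOURCE A (Python) =====
-- def isZeroPlentiful(arr):
--     n = len(arr)
--     i = 0
--     zero_seq = 0
--     has_zero = 0
--     while i < n:
--         if arr[i] != 0:
--             i += 1
--         else:
--             has_zero = 1
--             zero_seq += 1
--             count = 0
--             while i < n and arr[i] == 0:
--                 count += 1
--                 i += 1
--             if count < 4:
--                 return 0
--     return zero_seq if has_zero == 1 else 0
-- ===== SOURCE B (Python) =====
-- def isZeroPlentiful(arr):
--     # Build the table of maximal zero-run lengths in one pass, then validate it.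
--     runs = []
--     cur = 0
--     for x in arr:
--         if x == 0:
--             cur += 1
--         else:
--             if cur:
--                 runs.append(cur)
--             cur = 0
--     if cur:
--         runs.append(cur)
--     if not runs:
--         return 0
--     return len(runs) if all(l >= 4 for l in runs) else 0
-- ===== Notes on version B (the rewrite author's own statement) =====
-- stated objective: idiomatic
-- what changed: B replaces A's index-based outer/inner while loops with inline early return by a single for-loop that builds the list of zero-run lengths, followed by a separate validation pass over that table.
import Mathlib
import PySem

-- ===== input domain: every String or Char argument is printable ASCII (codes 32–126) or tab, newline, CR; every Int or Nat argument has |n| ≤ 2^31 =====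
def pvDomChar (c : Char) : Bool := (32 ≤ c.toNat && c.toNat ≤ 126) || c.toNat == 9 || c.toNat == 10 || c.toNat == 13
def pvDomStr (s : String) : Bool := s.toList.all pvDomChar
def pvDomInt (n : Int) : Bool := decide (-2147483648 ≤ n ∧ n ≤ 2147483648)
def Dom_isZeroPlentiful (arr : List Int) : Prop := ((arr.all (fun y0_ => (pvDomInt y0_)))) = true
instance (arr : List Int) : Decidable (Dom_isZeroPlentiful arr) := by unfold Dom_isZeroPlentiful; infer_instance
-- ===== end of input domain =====

-- B builds the zero-run-length table in one fold and validates it in a second pass,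
-- instead of A's index-based nested while loops with an inline early return (idiomatic; same O(n) cost).

-- ===== PORT A =====
-- cz l = length of the maximal leading block of zeros of l (the inner `while` counter)
def cz : List Int → Int
  | [] => 0
  | x :: t => if x = 0 then 1 + cz t else 0

-- dz l = l with its leading zeros removed (where the inner `while` leaves `i`)
def dz : List Int → List Int
  | [] => []
  | x :: t => if x = 0 then dz t else x :: t

theorem dz_length_le (l : List Int) : (dz l).length ≤ l.length := by
  induction l with
  | nil => simp [dz]
  | cons x t ih => simp only [dz]; split <;> simp <;> omega

-- A's outer `while i < n` over the remaining suffix of arr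
def aLoop : List Int → Int → Int → Int
  | [], zs, hz => if hz = 1 then zs else 0
  | x :: rest, zs, hz =>
      if x ≠ 0 then aLoop rest zs hz
      else
        -- has_zero := 1; zero_seq += 1; count := inner while = 1 + cz rest
        if 1 + cz rest < 4 then 0
        else aLoop (dz rest) (zs + 1) 1
termination_by l _ _ => l.length
decreasing_by
  · simp
  · have := dz_length_le rest; simp; omega

def isZeroPlentiful (arr : List Int) : Int := aLoop arr 0 0

-- ===== PORT B =====
-- one step of B's for-loop: state = (runs table so far, current run length)
def bStep (p : List Int × Int) (x : Int) : List Int × Int :=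
  if x = 0 then (p.1, p.2 + 1)
  else if p.2 ≠ 0 then (p.1 ++ [p.2], 0)
  else (p.1, 0)

def isZeroPlentiful_alt (arr : List Int) : Int :=
  let p := arr.foldl bStep ([], 0)
  let runs := if p.2 ≠ 0 then p.1 ++ [p.2] else p.1
  if runs = [] then 0
  else if runs.all (fun l => 4 ≤ l) then (runs.length : Int)
  else 0

-- ===== PRECONDITION & SPEC =====
def Spec_isZeroPlentiful (arr : List Int) (out : Int) : Prop := out = isZeroPlentiful_alt arr
instance (arr : List Int) (out : Int) : Decidable (Spec_isZeroPlentiful arr out) := by unfold Spec_isZeroPlentiful; infer_instance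

-- ===== CLAIM (what is proved, stated in full; the proofs are below) =====
def Claim_equal_isZeroPlentiful : Prop := ∀ (arr : List Int), Dom_isZeroPlentiful arr → Spec_isZeroPlentiful arr (isZeroPlentiful arr)

-- ===== LEMMAS AND PROOFS =====

-- ===== VERDICT (by name: the statement is the Claim_ definition above) =====
-- zruns arr = the list of lengths of the maximal zero-runs of arr
def zruns : List Int → List Int
  | [] => []
  | x :: t => if x = 0 then (1 + cz t) :: zruns (dz t) else zruns t
termination_by l => l.length
decreasing_by
  · have := dz_length_le t; simp; omega
  · simp

theorem aLoop_eq_aux (n : Nat) : ∀ (arr : List Int), arr.length ≤ n →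
    ∀ (zs hz : Int), hz = 1 ∨ (hz = 0 ∧ zs = 0) →
    aLoop arr zs hz =
      if (zruns arr).all (fun l => 4 ≤ l) then
        (if zruns arr = [] then (if hz = 1 then zs else 0)
         else zs + ((zruns arr).length : Int))
      else 0 := by
  induction n with
  | zero =>
    intro arr hlen zs hz h
    have : arr = [] := List.eq_nil_of_length_eq_zero (Nat.le_zero.mp hlen)
    subst this
    rcases h with h | ⟨h1, h2⟩ <;> simp [aLoop, zruns, *]
  | succ n ih =>
    intro arr hlen zs hz h
    match arr with
    | [] => rcases h with h | ⟨h1, h2⟩ <;> simp [aLoop, zruns, *]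
    | x :: t =>
      by_cases hx : x = 0
      · subst hx
        simp only [aLoop, ne_eq, not_true_eq_false, if_false]
        have hz1 : zruns ((0:Int) :: t) = (1 + cz t) :: zruns (dz t) := by simp [zruns]
        by_cases hc : 1 + cz t < 4
        · rw [if_pos hc]
          have : ¬ ((zruns ((0:Int) :: t)).all (fun l => 4 ≤ l)) = true := by
            simp [hz1]; intro hge; omega
          simp [this]
        · rw [if_neg hc]
          have hlt : (dz t).length ≤ n := by
            have := dz_length_le t; simp at hlen; omega
          rw [ih (dz t) hlt (zs + 1) 1 (Or.inl rfl), hz1]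
          have h4 : (4:Int) ≤ 1 + cz t := by omega
          by_cases ha : ((zruns (dz t)).all (fun l => 4 ≤ l)) = true <;>
            by_cases he : zruns (dz t) = [] <;>
              simp [ha, h4, he] <;> push_cast <;> ring
      · have hz1 : zruns (x :: t) = zruns t := by simp [zruns, hx]
        simp only [aLoop, hx, ne_eq, not_false_eq_true, if_true, hz1]
        exact ih t (by simp at hlen; omega) zs hz h

theorem aLoop_eq (arr : List Int) (zs hz : Int) (h : hz = 1 ∨ (hz = 0 ∧ zs = 0)) :
    aLoop arr zs hz =
      if (zruns arr).all (fun l => 4 ≤ l) then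
        (if zruns arr = [] then (if hz = 1 then zs else 0)
         else zs + ((zruns arr).length : Int))
      else 0 :=
  aLoop_eq_aux arr.length arr le_rfl zs hz h

theorem bFold_eq (arr : List Int) (rs : List Int) (cur : Int) (h : 0 ≤ cur) :
    (let p := arr.foldl bStep (rs, cur)
     if p.2 ≠ 0 then p.1 ++ [p.2] else p.1) =
      rs ++ (if cur = 0 then zruns arr else (cur + cz arr) :: zruns (dz arr)) := by
  induction arr generalizing rs cur with
  | nil =>
    by_cases hc : cur = 0 <;> simp [bStep, zruns, cz, dz, hc]
  | cons x t ih =>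
    simp only [List.foldl_cons]
    by_cases hx : x = 0
    · simp only [bStep, hx, if_pos]
      rw [ih rs (cur + 1) (by omega)]
      have hne : cur + 1 ≠ 0 := by omega
      by_cases hc : cur = 0 <;>
        simp [hc, hx, zruns, cz, dz, hne] <;> ring_nf
    · by_cases hc : cur = 0
      · simp only [bStep, hx, hc, if_neg hx, ne_eq, not_true_eq_false, if_false,
          if_pos rfl]
        rw [ih rs 0 le_rfl]
        simp [zruns, hx]
      · simp only [bStep, if_neg hx, ne_eq, hc, not_false_eq_true, if_true, if_pos]
        rw [ih (rs ++ [cur]) 0 le_rfl]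
        simp [zruns, cz, dz, hx, hc]

theorem isZeroPlentiful_spec : Claim_equal_isZeroPlentiful := by
  intro arr _
  unfold Spec_isZeroPlentiful isZeroPlentiful isZeroPlentiful_alt
  rw [aLoop_eq arr 0 0 (Or.inr ⟨rfl, rfl⟩)]
  have hb := bFold_eq arr [] 0 le_rfl
  simp only at hb
  simp only [hb, if_pos rfl, List.nil_append]
  by_cases he : zruns arr = []
  · simp [he]
  · by_cases ha : ((zruns arr).all fun l => decide (4 ≤ l)) = true
    · simp [he, ha, List.all_eq_true.mp ha]
    · have hna : ¬ ∀ x ∈ zruns arr, 4 ≤ x := by simpa [List.all_eq_true] using ha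
      simp [he, ha, hna]
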